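-- pv_equiv track=rewrite | github.com/Braisrg5/ProjectEuler | solutions/problem_051I.py | create_masks_v2
-- ===== SOURCE A (Python) =====
-- from itertools import combinations
-- from collections import Counter
--
-- def bit_strings(digits, subs):
--     '''https://stackoverflow.com/a/63100745
--     Generates all combinations with  strings of length n'''
--     # List of the indexes of the digits to be replaced
--     index_combinations = combinations(range(digits), subs)
--     for indices in index_combinations:
--         yield ''.join('*' if i in indices else 'X' for i in range(digits))
--
-- def create_masks_v2(str_prime):
--     '''Creates all possible masks for a given prime number.'''
--     digits = len(str_prime)
--     # Masks if we replace just one digit: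
--     masks1 = bit_strings(digits, 1)
--     yield from masks1
--
--     count_digits = Counter(str_prime)
--     # Masks if we replace more than one digit:
--     if len(count_digits) == 1:
--         return
--     for digit, count in count_digits.items():
--         if count <= 1:
--             continue
--         for i in range(1, count+1):
--             for temp_mask in bit_strings(count, i):
--                 mask, temp_index = '', 0
--                 for dig in str_prime:
--                     if dig == digit:
--                         mask += temp_mask[temp_index]
--                         temp_index += 1
--                     else:
--                         mask += 'X'
--                 yield mask
-- ===== SOURCE B (Python) =====
-- def create_masks_v2(str_prime):
--     '''Creates all possible masks for a given prime number.'''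
--     n = len(str_prime)
--     # single-'*' masks, one per position
--     for j in range(n):
--         yield 'X' * j + '*' + 'X' * (n - j - 1)
--     distinct = list(dict.fromkeys(str_prime))
--     if len(distinct) == 1:
--         return
--     for digit in distinct:
--         c = str_prime.count(digit)
--         if c <= 1:
--             continue
--         # branching expansion: build all 2**c masks for this digit in one
--         # left-to-right pass over the string ('*' branch before 'X' at each
--         # occurrence), then emit them bucketed by star count (stable).
--         variants = ['']
--         for ch in str_prime:
--             if ch == digit:
--                 variants = [v + b for v in variants for b in '*X']
--             else:
--                 variants = [v + 'X' for v in variants]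
--         for i in range(1, c + 1):
--             for m in variants:
--                 if m.count('*') == i:
--                     yield m
-- ===== Notes on version B (the rewrite author's own statement) =====
-- stated objective: alternative
-- what changed: For each repeated digit, B replaces A's enumeration of index combinations (bit_strings) plus a per-mask rescan of the string by a single left-to-right branching expansion that builds all 2^c masks of that digit at once ('*' branch before 'X' at each occurrence) and then emits them bucketed by star count.
import Mathlib
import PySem

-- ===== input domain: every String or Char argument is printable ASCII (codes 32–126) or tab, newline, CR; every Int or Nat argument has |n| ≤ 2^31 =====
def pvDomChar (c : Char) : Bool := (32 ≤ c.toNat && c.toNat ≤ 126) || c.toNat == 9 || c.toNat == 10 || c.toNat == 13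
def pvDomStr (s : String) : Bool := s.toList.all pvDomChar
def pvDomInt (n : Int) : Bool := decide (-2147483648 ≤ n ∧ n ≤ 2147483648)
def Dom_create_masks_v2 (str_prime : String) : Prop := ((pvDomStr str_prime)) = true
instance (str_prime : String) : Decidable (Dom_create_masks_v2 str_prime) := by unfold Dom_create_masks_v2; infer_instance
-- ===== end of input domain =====

-- B replaces A's combinations-over-occurrence-indices plus per-mask rescan by a single
-- left-to-right branching expansion producing all 2^c masks of a digit at once, bucketed
-- by star count; objective: alternative.

-- ===== PORT A =====
-- bit_strings(digits, subs): combinations of range(digits), each rendered as a '*'/'X' mask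
-- (masks handled as List Char; the ports wrap String.ofList exactly where Python yields the string)
def bit_strings (digits subs : Nat) : List (List Char) :=
  (PySem.List.combinations (List.range digits) subs).map
    (fun indices => (List.range digits).map (fun i => if i ∈ indices then '*' else 'X'))

-- the inner  for dig in str_prime: …  loop building `mask` while consuming temp_mask[temp_index];
-- temp_index is always in range (temp_mask has one entry per occurrence), so getD's default is never used
def create_masks_v2_expand (digit : Char) (temp_mask : List Char) : List Char → Nat → List Char
  | [], _ => []
  | dig :: rest, temp_index =>
    if dig = digit then
      temp_mask.getD temp_index 'X' :: create_masks_v2_expand digit temp_mask rest (temp_index + 1)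
    else
      'X' :: create_masks_v2_expand digit temp_mask rest temp_index

def create_masks_v2 (str_prime : String) : List String :=
  let l := str_prime.toList
  let digits := l.length
  let masks1 := (bit_strings digits 1).map String.ofList
  let count_digits := PySem.Dict.counter l
  if count_digits.size = 1 then masks1
  else
    masks1 ++ count_digits.items.flatMap (fun dc =>
      if dc.2 ≤ 1 then []
      else
        -- range(1, count+1) ported over Nat (the counter's counts are ≥ 0)
        (List.range' 1 dc.2.toNat).flatMap (fun i =>
          (bit_strings dc.2.toNat i).map (fun temp_mask =>
            String.ofList (create_masks_v2_expand dc.1 temp_mask l 0))))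

-- ===== PORT B =====
def create_masks_v2_alt (str_prime : String) : List String :=
  let l := str_prime.toList
  let n := l.length
  let singles := (List.range n).map (fun j =>
      String.ofList (List.replicate j 'X' ++ '*' :: List.replicate (n - j - 1) 'X'))
  -- list(dict.fromkeys(str_prime))
  let distinct := PySem.List.dedup l
  if distinct.length = 1 then singles
  else
    singles ++ distinct.flatMap (fun digit =>
      let c := l.count digit
      if c ≤ 1 then []
      else
        -- branching expansion: one pass over the string, '*' branch before 'X'
        let variants := l.foldl (fun vs ch =>
          if ch = digit then vs.flatMap (fun v => ['*', 'X'].map (fun b => v ++ [b]))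
          else vs.map (fun v => v ++ ['X'])) [[]]
        (List.range' 1 c).flatMap (fun i =>
          (variants.filter (fun m => m.count '*' == i)).map String.ofList))

-- ===== PRECONDITION & SPEC =====
def Spec_create_masks_v2 (str_prime : String) (out : List String) : Prop := out = create_masks_v2_alt str_prime
instance (str_prime : String) (out : List String) : Decidable (Spec_create_masks_v2 str_prime out) := by unfold Spec_create_masks_v2; infer_instance

-- ===== CLAIM (what is proved, stated in full; the proofs are below) =====
def Claim_equal_create_masks_v2 : Prop := ∀ (str_prime : String), Dom_create_masks_v2 str_prime → Spec_create_masks_v2 str_prime (create_masks_v2 str_prime)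

-- ===== LEMMAS AND PROOFS =====

-- all '*'/'X' strings of length c, first character slowest, '*' before 'X'
def masksAll : Nat → List (List Char)
  | 0 => [[]]
  | c + 1 => (masksAll c).map ('*' :: ·) ++ (masksAll c).map ('X' :: ·)

theorem length_of_mem_masksAll (c : Nat) (t : List Char) (h : t ∈ masksAll c) :
    t.length = c := by
  induction c generalizing t with
  | zero => simp [masksAll] at h; simp [h]
  | succ c ih =>
    simp only [masksAll, List.mem_append, List.mem_map] at h
    rcases h with ⟨t0, h0, rfl⟩ | ⟨t0, h0, rfl⟩ <;> simp [ih _ h0]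

-- rendering an index set over 0 :: succ-shifted range, split off the first position
theorem renderStar (c : Nat) (idxs : List Nat) :
    List.map (fun i => if i ∈ 0 :: List.map Nat.succ idxs then '*' else 'X')
        (0 :: List.map Nat.succ (List.range c)) =
      '*' :: List.map (fun i => if i ∈ idxs then '*' else 'X') (List.range c) := by
  rw [List.map_cons, List.map_map]
  have hhead : (if (0 : Nat) ∈ 0 :: List.map Nat.succ idxs then '*' else 'X') = '*' := by simp
  rw [hhead]
  congr 1
  apply List.map_congr_left
  intro j _
  simp only [Function.comp_apply, List.mem_cons, List.mem_map]
  congr 1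
  simp only [eq_iff_iff]
  constructor
  · rintro (h | ⟨x, hx, he⟩)
    · omega
    · have : x = j := by omega
      exact this ▸ hx
  · intro hj
    exact Or.inr ⟨j, hj, rfl⟩

theorem renderX (c : Nat) (idxs : List Nat) :
    List.map (fun i => if i ∈ List.map Nat.succ idxs then '*' else 'X')
        (0 :: List.map Nat.succ (List.range c)) =
      'X' :: List.map (fun i => if i ∈ idxs then '*' else 'X') (List.range c) := by
  rw [List.map_cons, List.map_map]
  have hhead : (if (0 : Nat) ∈ List.map Nat.succ idxs then '*' else 'X') = 'X' := by
    rw [if_neg]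
    intro h
    rcases List.mem_map.1 h with ⟨x, _, hx⟩
    omega
  rw [hhead]
  congr 1
  apply List.map_congr_left
  intro j _
  simp only [Function.comp_apply, List.mem_map]
  congr 1
  simp only [eq_iff_iff]
  constructor
  · rintro ⟨x, hx, he⟩
    have : x = j := by omega
    exact this ▸ hx
  · intro hj
    exact ⟨j, hj, rfl⟩

-- the masks of length c with exactly i stars, in masksAll order, are exactly bit_strings c i
theorem masksAll_filter (c i : Nat) :
    (masksAll c).filter (fun m => m.count '*' == i) = bit_strings c i := by
  induction c generalizing i with
  | zero =>
    match i with
    | 0 => simp [masksAll, bit_strings, PySem.List.combinations_zero]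
    | i + 1 => simp [masksAll, bit_strings, PySem.List.combinations_nil_succ]
  | succ c ih =>
    have hnil : ∀ n : Nat, (List.range n).map (fun j => if j ∈ ([] : List Nat) then '*' else 'X') =
        List.replicate n 'X' := by
      intro n
      simp
    rw [masksAll, List.filter_append, List.filter_map, List.filter_map]
    match i with
    | 0 =>
      have h1 : (masksAll c).filter ((fun m => m.count '*' == 0) ∘ ('*' :: ·)) = [] := by
        apply List.filter_eq_nil_iff.2
        intro m _
        simp
      have h2 : (masksAll c).filter ((fun m => m.count '*' == 0) ∘ ('X' :: ·)) =
          (masksAll c).filter (fun m => m.count '*' == 0) := by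
        apply List.filter_congr
        intro m _
        simp
      rw [h1, h2, ih 0]
      rw [bit_strings, bit_strings, PySem.List.combinations_zero, PySem.List.combinations_zero]
      simp only [List.map_cons, List.map_nil, List.nil_append]
      rw [hnil, hnil, List.replicate_succ]
    | i + 1 =>
      have h1 : (masksAll c).filter ((fun m => m.count '*' == i + 1) ∘ ('*' :: ·)) =
          (masksAll c).filter (fun m => m.count '*' == i) := by
        apply List.filter_congr
        intro m _
        simp
      have h2 : (masksAll c).filter ((fun m => m.count '*' == i + 1) ∘ ('X' :: ·)) =
          (masksAll c).filter (fun m => m.count '*' == i + 1) := by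
        apply List.filter_congr
        intro m _
        simp
      rw [h1, h2, ih i, ih (i + 1)]
      rw [bit_strings, bit_strings, bit_strings]
      rw [List.range_succ_eq_map, PySem.List.combinations_cons_succ, List.map_append]
      congr 1
      · rw [PySem.List.combinations_map, List.map_map, List.map_map, List.map_map]
        apply List.map_congr_left
        intro idxs _
        simp only [Function.comp_apply]
        rw [renderStar]
      · rw [PySem.List.combinations_map, List.map_map, List.map_map]
        apply List.map_congr_left
        intro idxs _
        simp only [Function.comp_apply]
        rw [renderX]

-- consuming temp_mask from index m is consuming its drop from index 0
theorem expand_drop (k : Char) (t l : List Char) (m : Nat) :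
    create_masks_v2_expand k t l m = create_masks_v2_expand k (t.drop m) l 0 := by
  induction l generalizing t m with
  | nil => simp [create_masks_v2_expand]
  | cons c s ih =>
    rw [create_masks_v2_expand, create_masks_v2_expand]
    by_cases hc : c = k
    · rw [if_pos hc, if_pos hc, ih t (m + 1), ih (t.drop m) 1, List.drop_drop]
      have hh : t.getD m 'X' = (t.drop m).getD 0 'X' := by
        rw [List.getD_eq_getElem?_getD, List.getD_eq_getElem?_getD, List.getElem?_drop,
          Nat.add_zero]
      rw [hh]
    · rw [if_neg hc, if_neg hc, ih t m]

-- the expansion's star count is the temp mask's star count (temp mask as long as the occurrence count)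
theorem count_expand (k : Char) (l t : List Char) :
    (create_masks_v2_expand k t l 0).count '*' = (t.take (l.count k)).count '*' := by
  induction l generalizing t with
  | nil => simp [create_masks_v2_expand]
  | cons c s ih =>
    rw [create_masks_v2_expand]
    by_cases hc : c = k
    · rw [if_pos hc, expand_drop k t s 1]
      have hcc : List.count k (c :: s) = List.count k s + 1 := by
        simp [hc]
      rw [hcc]
      match t with
      | [] =>
        simp [ih]
      | b :: t0 =>
        rw [List.take_succ_cons, List.count_cons, List.count_cons]
        simp only [List.getD_cons_zero, List.drop_succ_cons, List.drop_zero]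
        rw [ih t0]
    · have hcc : List.count k (c :: s) = List.count k s := by
        simp [hc]
      rw [if_neg hc, hcc, List.count_cons]
      simp [ih t]

-- B's branching pass, characterised: it is masksAll (count) expanded over the string
theorem variants_gen (k : Char) (l : List Char) (vs : List (List Char)) :
    l.foldl (fun vs ch =>
        if ch = k then vs.flatMap (fun v => ['*', 'X'].map (fun b => v ++ [b]))
        else vs.map (fun v => v ++ ['X'])) vs =
      vs.flatMap (fun v => (masksAll (l.count k)).map
        (fun t => v ++ create_masks_v2_expand k t l 0)) := by
  induction l generalizing vs with
  | nil => simp [masksAll, create_masks_v2_expand]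
  | cons c s ih =>
    rw [List.foldl_cons]
    by_cases hc : c = k
    · have hcc : List.count k (c :: s) = List.count k s + 1 := by
        simp [hc]
      rw [if_pos hc, ih, hcc]
      rw [List.flatMap_assoc]
      apply List.flatMap_congr
      intro v _
      rw [masksAll, List.map_append, List.map_map, List.map_map]
      simp only [List.map_cons, List.map_nil, List.flatMap_cons, List.flatMap_nil,
        List.append_nil]
      congr 1
      · apply List.map_congr_left
        intro t0 _
        simp only [Function.comp_apply]
        rw [create_masks_v2_expand, if_pos hc, expand_drop k ('*' :: t0) s 1]
        simp [List.append_assoc]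
      · apply List.map_congr_left
        intro t0 _
        simp only [Function.comp_apply]
        rw [create_masks_v2_expand, if_pos hc, expand_drop k ('X' :: t0) s 1]
        simp [List.append_assoc]
    · have hcc : List.count k (c :: s) = List.count k s := by
        simp [hc]
      rw [if_neg hc, ih, hcc]
      rw [List.flatMap_map]
      apply List.flatMap_congr
      intro v _
      apply List.map_congr_left
      intro t _
      rw [create_masks_v2_expand, if_neg hc]
      simp [List.append_assoc]

theorem variants_eq (k : Char) (l : List Char) :
    l.foldl (fun vs ch =>
        if ch = k then vs.flatMap (fun v => ['*', 'X'].map (fun b => v ++ [b]))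
        else vs.map (fun v => v ++ ['X'])) [[]] =
      (masksAll (l.count k)).map (fun t => create_masks_v2_expand k t l 0) := by
  rw [variants_gen]
  simp

-- per-digit block equality
theorem per_key_eq (l : List Char) (k : Char) :
    (if (List.count k l : Int) ≤ 1 then []
     else (List.range' 1 (List.count k l : Int).toNat).flatMap (fun i =>
        (bit_strings (List.count k l : Int).toNat i).map (fun temp_mask =>
          String.ofList (create_masks_v2_expand k temp_mask l 0)))) =
    (if l.count k ≤ 1 then []
     else
      (List.range' 1 (l.count k)).flatMap (fun i =>
        (((masksAll (l.count k)).map (fun t => create_masks_v2_expand k t l 0)).filter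
            (fun m => m.count '*' == i)).map String.ofList)) := by
  have hcnt : List.count k l = l.count k := rfl
  have htn : (List.count k l : Int).toNat = l.count k := by simp
  by_cases hg : l.count k ≤ 1
  · rw [if_pos (by exact_mod_cast hcnt ▸ hg), if_pos hg]
  · rw [if_neg (by rw [hcnt]; exact_mod_cast hg), if_neg hg, htn]
    apply List.flatMap_congr
    intro i _
    rw [List.filter_map]
    have hfc : (masksAll (l.count k)).filter
        ((fun m => m.count '*' == i) ∘ (fun t => create_masks_v2_expand k t l 0)) =
        (masksAll (l.count k)).filter (fun m => m.count '*' == i) := by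
      apply List.filter_congr
      intro t ht
      have hlen := length_of_mem_masksAll _ _ ht
      simp only [Function.comp_apply]
      rw [count_expand, ← hlen, List.take_length]
    rw [hfc, masksAll_filter, List.map_map]
    rfl

-- the two single-'*' mask lists agree
theorem single_mask_eq (n j : Nat) (hj : j < n) :
    (List.range n).map (fun i => if i = j then '*' else 'X') =
      List.replicate j 'X' ++ '*' :: List.replicate (n - j - 1) 'X' := by
  induction j generalizing n with
  | zero =>
    match n, hj with
    | n + 1, _ =>
      rw [List.range_succ_eq_map, List.map_cons, List.map_map]
      simp [List.eq_replicate_iff]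
  | succ j ih =>
    match n, hj with
    | n + 1, hj =>
      rw [List.range_succ_eq_map, List.map_cons, List.map_map]
      rw [List.replicate_succ, List.cons_append]
      rw [show (n + 1) - (j + 1) - 1 = n - j - 1 from by omega]
      rw [← ih n (by omega)]
      congr 1
      apply List.map_congr_left
      intro i _
      simp

theorem masks1_eq (l : List Char) :
    (bit_strings l.length 1).map String.ofList =
      (List.range l.length).map (fun j =>
        String.ofList (List.replicate j 'X' ++ '*' :: List.replicate (l.length - j - 1) 'X')) := by
  rw [bit_strings, PySem.List.combinations_one, List.map_map, List.map_map]
  apply List.map_congr_left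
  intro j hj
  rw [List.mem_range] at hj
  simp only [Function.comp_apply]
  congr 1
  rw [← single_mask_eq l.length j hj]
  apply List.map_congr_left
  intro i _
  simp

-- ===== VERDICT (by name: the statement is the Claim_ definition above) =====
theorem create_masks_v2_spec : Claim_equal_create_masks_v2 := by
  intro s _
  simp only [Spec_create_masks_v2, create_masks_v2, create_masks_v2_alt]
  have hsize : (PySem.Dict.counter s.toList).size = (PySem.List.dedup s.toList).length := by
    simp [PySem.Dict.size, PySem.Dict.items_counter]
  have htail : (PySem.Dict.counter s.toList).items.flatMap (fun dc =>
      if dc.2 ≤ 1 then []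
      else (List.range' 1 dc.2.toNat).flatMap (fun i =>
          (bit_strings dc.2.toNat i).map (fun temp_mask =>
            String.ofList (create_masks_v2_expand dc.1 temp_mask s.toList 0)))) =
    (PySem.List.dedup s.toList).flatMap (fun digit =>
      if s.toList.count digit ≤ 1 then []
      else
        (List.range' 1 (s.toList.count digit)).flatMap (fun i =>
          (((s.toList.foldl (fun vs ch =>
              if ch = digit then vs.flatMap (fun v => ['*', 'X'].map (fun b => v ++ [b]))
              else vs.map (fun v => v ++ ['X'])) [[]]).filter
            (fun m => m.count '*' == i)).map String.ofList))) := by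
    rw [PySem.Dict.items_counter, ← PySem.List.dedup_eq_ofList, List.flatMap_map]
    apply List.flatMap_congr
    intro k _
    rw [variants_eq]
    simpa using per_key_eq s.toList k
  by_cases hs : (PySem.Dict.counter s.toList).size = 1
  · rw [if_pos hs, if_pos (by rw [← hsize]; exact hs)]
    exact masks1_eq s.toList
  · rw [if_neg hs, if_neg (by rw [← hsize]; exact hs)]
    rw [masks1_eq s.toList, htail]
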